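-- pv_equiv track=rewrite | github.com/nash911/hunknote | hunknote/compose/graph.py | find_related_hunks
-- ===== SOURCE A (Python) =====
-- from collections import defaultdict, deque
--
-- def find_related_hunks(
--     hunk_id: str,
--     graph: dict[str, set[str]],
-- ) -> set[str]:
--     """Find all hunks transitively connected to a given hunk.
--
--     Treats the graph as undirected: follows edges in both directions
--     to find all hunks that must be in the same commit group.
--
--     Args:
--         hunk_id: The starting hunk ID.
--         graph: Directed dependency graph.
--
--     Returns:
--         Set of all transitively connected hunk IDs (including start).
--     """
--     # Build undirected adjacency
--     undirected: dict[str, set[str]] = defaultdict(set)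
--     for source, targets in graph.items():
--         for target in targets:
--             undirected[source].add(target)
--             undirected[target].add(source)
--
--     # BFS
--     visited: set[str] = set()
--     queue: deque[str] = deque([hunk_id])
--
--     while queue:
--         current = queue.popleft()
--         if current in visited:
--             continue
--         visited.add(current)
--         for neighbor in undirected.get(current, set()):
--             if neighbor not in visited:
--                 queue.append(neighbor)
--
--     return visited
-- ===== SOURCE B (Python) =====
-- def find_related_hunks(
--     hunk_id: str,
--     graph: dict[str, set[str]],
-- ) -> set[str]:
--     """Level-synchronous BFS over the undirected view of the graph.
--
--     Instead of a deque with per-node visited checks, keeps a frontier set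
--     and advances one whole level at a time with set algebra.
--     """
--     # Undirected adjacency as plain lists (duplicates are harmless here).
--     adj: dict[str, list[str]] = {}
--     for source, targets in graph.items():
--         for target in targets:
--             adj.setdefault(source, []).append(target)   # adj[source] = adj.get(source, []) + [target]
--             adj.setdefault(target, []).append(source)   # adj[target] = adj.get(target, []) + [source]
--
--     visited: set[str] = set()
--     frontier: set[str] = {hunk_id}
--     while frontier:
--         visited |= frontier
--         frontier = {nbr for node in frontier for nbr in adj.get(node, [])} - visited
--     return visited
-- ===== Notes on version B (the rewrite author's own statement) =====
-- stated objective: alternative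
-- what changed: Replaces A's deque-based node-at-a-time BFS (pop, skip-if-visited, append unvisited neighbours) by a level-synchronous frontier BFS that absorbs a whole frontier set per iteration via set algebra (visited |= frontier; frontier = neighbours(frontier) - visited), over a plain list-of-lists adjacency map instead of a defaultdict of sets.
import Mathlib
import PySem

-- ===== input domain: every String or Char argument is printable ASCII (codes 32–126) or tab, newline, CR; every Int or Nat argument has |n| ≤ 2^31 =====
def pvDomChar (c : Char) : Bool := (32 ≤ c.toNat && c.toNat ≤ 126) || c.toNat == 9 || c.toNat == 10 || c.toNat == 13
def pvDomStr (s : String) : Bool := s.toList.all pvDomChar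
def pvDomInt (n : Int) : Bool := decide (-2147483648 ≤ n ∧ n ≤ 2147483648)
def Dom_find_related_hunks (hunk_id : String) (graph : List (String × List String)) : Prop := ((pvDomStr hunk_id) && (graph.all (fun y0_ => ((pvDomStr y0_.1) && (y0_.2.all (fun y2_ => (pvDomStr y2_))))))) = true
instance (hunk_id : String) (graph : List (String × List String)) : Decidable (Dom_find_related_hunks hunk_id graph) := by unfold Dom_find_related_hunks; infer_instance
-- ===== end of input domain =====

-- B replaces A's deque-based node-at-a-time BFS (with visited checks at pop time) by a
-- level-synchronous frontier BFS using set algebra over a plain-list adjacency map; the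
-- returned value is the same set of hunk ids (objective: alternative, not claimed faster).
-- Python returns a set: the ports return its distinct elements as a list (order is not
-- part of the Python value).

-- ===== PORT A =====

-- helper lemmas needed by the termination argument of the BFS loop ports
theorem pv_getD_mem_flatten (d : PySem.Dict String (List String)) (k x : String)
    (hx : x ∈ d.getD k []) : x ∈ d.values.flatten := by
  cases h : d.get? k with
  | none =>
      rw [PySem.Dict.getD_eq_get?_getD, h] at hx
      simp at hx
  | some v =>
      rw [PySem.Dict.getD_eq_get?_getD, h] at hx
      simp at hx
      have hmem : (k, v) ∈ d.items := PySem.Dict.mem_items_of_get?_eq_some (d := d) h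
      have : v ∈ d.values := by
        show v ∈ d.items.map Prod.snd
        exact List.mem_map.mpr ⟨(k, v), hmem, rfl⟩
      exact List.mem_flatten.2 ⟨v, this, hx⟩

theorem pv_getD_length_le (d : PySem.Dict String (List String)) (k : String) :
    (d.getD k []).length ≤ d.values.flatten.length := by
  cases h : d.get? k with
  | none => rw [PySem.Dict.getD_eq_get?_getD, h]; simp
  | some v =>
      rw [PySem.Dict.getD_eq_get?_getD, h]
      have hmem : (k, v) ∈ d.items := PySem.Dict.mem_items_of_get?_eq_some (d := d) h
      have hv : v ∈ d.values := by
        show v ∈ d.items.map Prod.snd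
        exact List.mem_map.mpr ⟨(k, v), hmem, rfl⟩
      have : v.Sublist d.values.flatten := (List.sublist_flatten_of_mem hv)
      simpa using this.length_le

-- measure for the port of A's while-loop
def pvMeasA (adj : PySem.Dict String (PySem.Set String)) (visited : PySem.Set String)
    (q : List String) : Nat :=
  ((adj.values.flatten ++ q).toFinset \ visited.toFinset).card * (adj.values.flatten.length + 2)
    + q.length

theorem pvMeasA_skip (adj : PySem.Dict String (PySem.Set String)) (visited : PySem.Set String)
    (cur : String) (rest : List String) :
    pvMeasA adj visited rest < pvMeasA adj visited (cur :: rest) := by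
  have hsub : ((adj.values.flatten ++ rest).toFinset \ visited.toFinset)
      ⊆ ((adj.values.flatten ++ cur :: rest).toFinset \ visited.toFinset) := by
    intro x hx
    simp only [Finset.mem_sdiff, List.mem_toFinset, List.mem_append, List.mem_cons] at hx ⊢
    tauto
  have := Finset.card_le_card hsub
  unfold pvMeasA
  have h2 : ((adj.values.flatten ++ rest).toFinset \ visited.toFinset).card * (adj.values.flatten.length + 2)
      ≤ ((adj.values.flatten ++ cur :: rest).toFinset \ visited.toFinset).card * (adj.values.flatten.length + 2) :=
    Nat.mul_le_mul_right _ this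
  simp only [List.length_cons]
  omega

theorem pvMeasA_visit (adj : PySem.Dict String (PySem.Set String)) (visited : PySem.Set String)
    (cur : String) (rest : List String) (hcur : cur ∉ visited) :
    pvMeasA adj (PySem.Set.add visited cur)
      (rest ++ (adj.getD cur PySem.Set.empty).filter
        (fun n => !(PySem.Set.contains (PySem.Set.add visited cur) n)))
      < pvMeasA adj visited (cur :: rest) := by
  set U := adj.values.flatten with hU
  set nbrs := (adj.getD cur PySem.Set.empty).filter
      (fun n => !(PySem.Set.contains (PySem.Set.add visited cur) n)) with hnbrs
  have hcurmem : cur ∈ ((U ++ cur :: rest).toFinset \ visited.toFinset) := by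
    simp only [Finset.mem_sdiff, List.mem_toFinset, List.mem_append, List.mem_cons]
    refine ⟨by tauto, hcur⟩
  have hsub : ((U ++ (rest ++ nbrs)).toFinset \ (PySem.Set.add visited cur).toFinset)
      ⊆ ((U ++ cur :: rest).toFinset \ visited.toFinset).erase cur := by
    intro x hx
    simp only [Finset.mem_sdiff, List.mem_toFinset, List.mem_append, Finset.mem_erase,
      List.mem_cons, PySem.Set.mem_add] at hx ⊢
    obtain ⟨hx1, hx2⟩ := hx
    push_neg at hx2
    refine ⟨hx2.2, ?_, hx2.1⟩
    rcases hx1 with h | h | h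
    · exact Or.inl h
    · exact Or.inr (Or.inr h)
    · have : x ∈ adj.getD cur PySem.Set.empty := List.mem_of_mem_filter h
      exact Or.inl (pv_getD_mem_flatten adj cur x this)
  have hcard : ((U ++ (rest ++ nbrs)).toFinset \ (PySem.Set.add visited cur).toFinset).card
      < ((U ++ cur :: rest).toFinset \ visited.toFinset).card := by
    calc _ ≤ (((U ++ cur :: rest).toFinset \ visited.toFinset).erase cur).card :=
          Finset.card_le_card hsub
      _ < _ := Finset.card_erase_lt_of_mem hcurmem
  have hlen : nbrs.length ≤ U.length := by
    calc nbrs.length ≤ (adj.getD cur PySem.Set.empty).length := List.length_filter_le _ _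
      _ ≤ U.length := pv_getD_length_le adj cur
  unfold pvMeasA
  have := Nat.succ_le_of_lt hcard
  have h3 : (((U ++ (rest ++ nbrs)).toFinset \ (PySem.Set.add visited cur).toFinset).card + 1)
      * (U.length + 2) ≤ ((U ++ cur :: rest).toFinset \ visited.toFinset).card * (U.length + 2) :=
    Nat.mul_le_mul_right _ this
  simp only [List.length_append, List.length_cons]
  nlinarith

-- literal port of A: build the undirected adjacency (defaultdict(set); two .add per edge) …
def pvUndirected (graph : List (String × List String)) : PySem.Dict String (PySem.Set String) :=
  graph.foldl (fun d p =>
    p.2.foldl (fun d t =>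
      (d.modify p.1 PySem.Set.empty (fun s => PySem.Set.add s t)).modify t PySem.Set.empty
        (fun s => PySem.Set.add s p.1)) d)
    PySem.Dict.empty

-- … then BFS with a FIFO queue, skipping nodes already visited at pop time
def pvBfsA (adj : PySem.Dict String (PySem.Set String)) (visited : PySem.Set String)
    (q : List String) : PySem.Set String :=
  match q with
  | [] => visited
  | cur :: rest =>
    if PySem.Set.contains visited cur then pvBfsA adj visited rest
    else
      pvBfsA adj (PySem.Set.add visited cur)
        (rest ++ (adj.getD cur PySem.Set.empty).filter
          (fun n => !(PySem.Set.contains (PySem.Set.add visited cur) n)))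
termination_by pvMeasA adj visited q
decreasing_by
  · exact pvMeasA_skip adj visited cur rest
  · exact pvMeasA_visit adj visited cur rest (by
      intro h
      rename_i hc
      exact hc ((PySem.Set.contains_iff visited cur).mpr h))

def find_related_hunks (hunk_id : String) (graph : List (String × List String)) : List String :=
  pvBfsA (pvUndirected graph) PySem.Set.empty [hunk_id]

-- ===== PORT B =====

-- lemma needed by the termination argument of pvBfsB
theorem pv_update_of_subset (s : List String) (xs : List String) (h : ∀ x ∈ xs, x ∈ s) :
    PySem.Set.update s xs = s := by
  induction xs generalizing s with
  | nil => rfl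
  | cons x xs ih =>
      rw [PySem.Set.update_cons, PySem.Set.add_of_mem (h x (by simp))]
      exact ih s (fun y hy => h y (by simp [hy]))

-- measure for the port of B's while-loop
def pvMeasB (adj : PySem.Dict String (List String)) (visited : PySem.Set String)
    (frontier : List String) : Nat :=
  2 * ((adj.values.flatten ++ frontier).toFinset \ visited.toFinset).card
    + (if frontier ≠ [] ∧ ∀ x ∈ frontier, x ∈ visited then 1 else 0)

theorem pvMeasB_step (adj : PySem.Dict String (List String)) (visited : PySem.Set String)
    (a : String) (fr : List String) :
    pvMeasB adj
      (PySem.Set.update visited (a :: fr))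
      (PySem.Set.diff (PySem.Set.ofList ((a :: fr).flatMap (fun u => adj.getD u [])))
        (PySem.Set.update visited (a :: fr)))
      < pvMeasB adj visited (a :: fr) := by
  unfold pvMeasB
  set U := adj.values.flatten with hU
  set v' := PySem.Set.update visited (a :: fr) with hv'
  set F' := PySem.Set.diff (PySem.Set.ofList ((a :: fr).flatMap (fun u => adj.getD u []))) v' with hF'
  have hF'U : ∀ x ∈ F', x ∈ U := by
    intro x hx
    have hx1 : x ∈ (a :: fr).flatMap (fun u => adj.getD u []) := by
      have h2 := (PySem.Set.mem_diff _ v' x).1 hx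
      exact (PySem.Set.mem_ofList _ x).1 h2.1
    obtain ⟨u, _, hxu⟩ := List.mem_flatMap.1 hx1
    exact pv_getD_mem_flatten adj u x hxu
  have hF'v' : ∀ x ∈ F', x ∉ v' := fun x hx => ((PySem.Set.mem_diff _ v' x).1 hx).2
  have hmem_v' : ∀ x, x ∈ v' ↔ x ∈ visited ∨ x ∈ a :: fr := by
    intro x; rw [hv']; simp [PySem.Set.mem_update]; tauto
  by_cases hprog : ∀ x ∈ a :: fr, x ∈ visited
  · have hveq : v' = visited := by rw [hv']; exact pv_update_of_subset visited (a :: fr) hprog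
    rw [hveq]
    have hsub : ((U ++ F').toFinset \ visited.toFinset) ⊆ ((U ++ a :: fr).toFinset \ visited.toFinset) := by
      intro x hx
      simp only [Finset.mem_sdiff, List.mem_toFinset, List.mem_append] at hx ⊢
      exact ⟨Or.inl (hx.1.elim id (hF'U x)), hx.2⟩
    have hc := Finset.card_le_card hsub
    have hcond2 : ¬(F' ≠ [] ∧ ∀ x ∈ F', x ∈ visited) := by
      rintro ⟨hne, hall⟩
      cases hFc : F' with
      | nil => exact hne hFc
      | cons y ys =>
          have hy1 : y ∉ v' := hF'v' y (by rw [hFc]; simp)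
          rw [hveq] at hy1
          exact hy1 (hall y (by rw [hFc]; simp))
    rw [if_neg hcond2, if_pos ⟨(by simp : (a :: fr) ≠ []), hprog⟩]
    omega
  · push_neg at hprog
    obtain ⟨y, hyF, hyv⟩ := hprog
    have hy : y ∈ ((U ++ a :: fr).toFinset \ visited.toFinset) := by
      simp only [Finset.mem_sdiff, List.mem_toFinset, List.mem_append]
      exact ⟨Or.inr hyF, hyv⟩
    have hsub : ((U ++ F').toFinset \ v'.toFinset) ⊆ ((U ++ a :: fr).toFinset \ visited.toFinset).erase y := by
      intro x hx
      simp only [Finset.mem_sdiff, List.mem_toFinset, List.mem_append, Finset.mem_erase] at hx ⊢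
      obtain ⟨h1, h2⟩ := hx
      have hxU : x ∈ U := h1.elim id (hF'U x)
      have hxy : x ≠ y := by
        intro he; subst he
        exact h2 ((hmem_v' x).2 (Or.inr hyF))
      have hxv : x ∉ visited := fun hc => h2 ((hmem_v' x).2 (Or.inl hc))
      exact ⟨hxy, Or.inl hxU, hxv⟩
    have hcard : ((U ++ F').toFinset \ v'.toFinset).card
        < ((U ++ a :: fr).toFinset \ visited.toFinset).card :=
      lt_of_le_of_lt (Finset.card_le_card hsub) (Finset.card_erase_lt_of_mem hy)
    split_ifs <;> omega

-- literal port of B: adjacency as dict of lists (setdefault(…,[]).append(x) = modify with default []) …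
def pvAdj (graph : List (String × List String)) : PySem.Dict String (List String) :=
  graph.foldl (fun d p =>
    p.2.foldl (fun d t =>
      (d.modify p.1 [] (fun l => l ++ [t])).modify t [] (fun l => l ++ [p.1])) d)
    PySem.Dict.empty

-- … then level-synchronous BFS: absorb the frontier, take its unvisited neighbours as the next level
def pvBfsB (adj : PySem.Dict String (List String)) (visited : PySem.Set String)
    (frontier : PySem.Set String) : PySem.Set String :=
  match frontier with
  | [] => visited
  | a :: fr =>
    pvBfsB adj (PySem.Set.update visited (a :: fr))
      (PySem.Set.diff (PySem.Set.ofList ((a :: fr).flatMap (fun u => adj.getD u [])))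
        (PySem.Set.update visited (a :: fr)))
termination_by pvMeasB adj visited frontier
decreasing_by
  exact pvMeasB_step adj visited a fr

def find_related_hunks_alt (hunk_id : String) (graph : List (String × List String)) : List String :=
  pvBfsB (pvAdj graph) PySem.Set.empty (PySem.Set.ofList [hunk_id])

-- ===== PRECONDITION & SPEC =====
def Spec_find_related_hunks (hunk_id : String) (graph : List (String × List String)) (out : List String) : Prop := out = find_related_hunks_alt hunk_id graph
instance (hunk_id : String) (graph : List (String × List String)) (out : List String) : Decidable (Spec_find_related_hunks hunk_id graph out) := by unfold Spec_find_related_hunks; infer_instance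

-- ===== CLAIM (what is proved, stated in full; the proofs are below) =====
def Claim_equal_find_related_hunks : Prop := ∀ (hunk_id : String) (graph : List (String × List String)), Dom_find_related_hunks hunk_id graph → Spec_find_related_hunks hunk_id graph (find_related_hunks hunk_id graph)

-- ===== LEMMAS AND PROOFS =====

-- `pvDF v q` = the distinct elements of q not in v, in first-occurrence order
def pvDF (v q : List String) : List String := PySem.Set.diff (PySem.Set.ofList q) v

def pvFlat (adj : PySem.Dict String (List String)) (g : List String) : List String :=
  g.flatMap (fun u => adj.getD u [])

theorem mem_pvDF (v q : List String) (x : String) : x ∈ pvDF v q ↔ x ∈ q ∧ x ∉ v := by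
  simp [pvDF, PySem.Set.mem_diff, PySem.Set.mem_ofList]

theorem nodup_pvDF (v q : List String) : (pvDF v q).Nodup :=
  PySem.Set.nodup_diff (PySem.Set.ofList q) v (PySem.Set.nodup_ofList q)

theorem pv_contains_eq (v : List String) (x : String) :
    PySem.Set.contains v x = decide (x ∈ v) := by
  by_cases h : x ∈ v
  · rw [(PySem.Set.contains_iff v x).mpr h, decide_eq_true h]
  · cases hc : PySem.Set.contains v x with
    | true => exact absurd ((PySem.Set.contains_iff v x).mp hc) h
    | false => rw [decide_eq_false h]

theorem pvDF_congr (v₁ v₂ q : List String) (h : ∀ x, x ∈ v₁ ↔ x ∈ v₂) :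
    pvDF v₁ q = pvDF v₂ q := by
  show (PySem.Set.ofList q).filter (fun x => !(PySem.Set.contains v₁ x))
      = (PySem.Set.ofList q).filter (fun x => !(PySem.Set.contains v₂ x))
  apply List.filter_congr
  intro x _
  by_cases h1 : x ∈ v₁
  · have h2 : x ∈ v₂ := (h x).1 h1
    simp [pv_contains_eq, h1, h2]
  · have h2 : x ∉ v₂ := fun h2 => h1 ((h x).2 h2)
    simp [pv_contains_eq, h1, h2]

theorem pvDF_nil (v : List String) : pvDF v [] = [] := rfl

theorem pvDF_cons (v : List String) (x : String) (q : List String) :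
    pvDF v (x :: q) = if x ∈ v then pvDF v q else x :: pvDF (x :: v) q := by
  have hdq : pvDF v (x :: q)
      = List.filter (fun a => !(PySem.Set.contains v a)) (x :: (PySem.Set.ofList q).discard x) := by
    show PySem.Set.diff (PySem.Set.ofList (x :: q)) v = _
    rw [PySem.Set.ofList_cons]
    rfl
  have hdisc : List.filter (fun a => !(PySem.Set.contains v a)) ((PySem.Set.ofList q).discard x)
      = List.filter (fun a => !(a == x) && !(PySem.Set.contains v a)) (PySem.Set.ofList q) := by
    show List.filter _ (List.filter (fun y => !(y == x)) (PySem.Set.ofList q)) = _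
    rw [List.filter_filter]
    apply List.filter_congr
    intro a _
    rw [Bool.and_comm]
  rw [hdq, List.filter_cons, hdisc]
  by_cases hx : x ∈ v
  · rw [if_neg (by simp [pv_contains_eq, hx]), if_pos hx]
    show _ = PySem.Set.diff (PySem.Set.ofList q) v
    show _ = List.filter (fun a => !(PySem.Set.contains v a)) (PySem.Set.ofList q)
    apply List.filter_congr
    intro a _
    by_cases hax : a = x
    · subst hax; simp [pv_contains_eq, hx]
    · simp [pv_contains_eq, beq_iff_eq, hax]
  · rw [if_pos (by simp [pv_contains_eq, hx]), if_neg hx]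
    congr 1
    show _ = List.filter (fun a => !(PySem.Set.contains (x :: v) a)) (PySem.Set.ofList q)
    apply List.filter_congr
    intro a _
    by_cases hax : a = x <;> by_cases hav : a ∈ v <;>
      simp [pv_contains_eq, beq_iff_eq, hax, hav, List.mem_cons]

theorem pvDF_append (v xs ys : List String) :
    pvDF v (xs ++ ys) = pvDF v xs ++ pvDF (v ++ xs) ys := by
  induction xs generalizing v with
  | nil => simp [pvDF_nil]
  | cons x xs ih =>
      rw [List.cons_append, pvDF_cons, pvDF_cons]
      by_cases hx : x ∈ v
      · rw [if_pos hx, if_pos hx, ih]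
        congr 1
        apply pvDF_congr
        intro a
        simp only [List.mem_append, List.mem_cons]
        constructor
        · rintro (h | h)
          · exact Or.inl h
          · exact Or.inr (Or.inr h)
        · rintro (h | h | h)
          · exact Or.inl h
          · exact Or.inl (h ▸ hx)
          · exact Or.inr h
      · rw [if_neg hx, if_neg hx, ih, List.cons_append]
        congr 2
        apply pvDF_congr
        intro a
        simp only [List.mem_append, List.mem_cons]
        tauto

theorem pvDF_pvDF (w v l : List String) : pvDF w (pvDF v l) = pvDF (v ++ w) l := by
  show PySem.Set.diff (PySem.Set.ofList (pvDF v l)) w = _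
  rw [PySem.Set.ofList_eq_self_of_nodup _ (nodup_pvDF v l)]
  show List.filter (fun a => !(PySem.Set.contains w a))
      (List.filter (fun a => !(PySem.Set.contains v a)) (PySem.Set.ofList l))
    = List.filter (fun a => !(PySem.Set.contains (v ++ w) a)) (PySem.Set.ofList l)
  rw [List.filter_filter]
  apply List.filter_congr
  intro a _
  by_cases h1 : a ∈ v <;> by_cases h2 : a ∈ w <;>
    simp [pv_contains_eq, h1, h2, List.mem_append]

-- the two adjacency builds agree: A's value at u is set(B's value at u)
theorem pvAdj_rel_inner (s : String) (ts : List String) :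
    ∀ (dA : PySem.Dict String (PySem.Set String)) (dB : PySem.Dict String (List String)),
      (∀ u, dA.getD u PySem.Set.empty = PySem.Set.ofList (dB.getD u [])) →
      ∀ u, (ts.foldl (fun d t => (d.modify s PySem.Set.empty (fun l => PySem.Set.add l t)).modify t
              PySem.Set.empty (fun l => PySem.Set.add l s)) dA).getD u PySem.Set.empty
        = PySem.Set.ofList ((ts.foldl (fun d t => (d.modify s [] (fun l => l ++ [t])).modify t []
              (fun l => l ++ [s])) dB).getD u []) := by
  induction ts with
  | nil => intro dA dB h u; exact h u
  | cons t ts ih =>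
      intro dA dB h u
      simp only [List.foldl_cons]
      apply ih
      intro w
      simp only [PySem.Dict.getD_modify]
      split_ifs
      · rw [h, PySem.Set.ofList_append_singleton, PySem.Set.ofList_append_singleton]
      · rw [h, PySem.Set.ofList_append_singleton]
      · rw [h, PySem.Set.ofList_append_singleton]
      · exact h w

theorem pvAdj_rel_outer (g : List (String × List String)) :
    ∀ (dA : PySem.Dict String (PySem.Set String)) (dB : PySem.Dict String (List String)),
      (∀ u, dA.getD u PySem.Set.empty = PySem.Set.ofList (dB.getD u [])) →
      ∀ u, (g.foldl (fun d p => p.2.foldl (fun d t => (d.modify p.1 PySem.Set.empty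
              (fun l => PySem.Set.add l t)).modify t PySem.Set.empty (fun l => PySem.Set.add l p.1)) d) dA).getD u PySem.Set.empty
        = PySem.Set.ofList ((g.foldl (fun d p => p.2.foldl (fun d t => (d.modify p.1 []
              (fun l => l ++ [t])).modify t [] (fun l => l ++ [p.1])) d) dB).getD u []) := by
  induction g with
  | nil => intro dA dB h u; exact h u
  | cons p g ih =>
      intro dA dB h u
      simp only [List.foldl_cons]
      exact ih _ _ (pvAdj_rel_inner p.1 p.2 dA dB h) u

theorem pvAdj_rel (graph : List (String × List String)) (u : String) :
    (pvUndirected graph).getD u PySem.Set.empty = PySem.Set.ofList ((pvAdj graph).getD u []) := by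
  unfold pvUndirected pvAdj
  refine pvAdj_rel_outer graph PySem.Dict.empty PySem.Dict.empty ?_ u
  intro w
  rw [PySem.Dict.getD_empty, PySem.Dict.getD_empty]
  rfl

theorem pvBfsB_nil (adj : PySem.Dict String (List String)) (v : PySem.Set String) :
    pvBfsB adj v [] = v := by
  rw [pvBfsB]

theorem pvBfsB_cons (adj : PySem.Dict String (List String)) (v : PySem.Set String)
    (a : String) (fr : List String) :
    pvBfsB adj v (a :: fr)
      = pvBfsB adj (PySem.Set.update v (a :: fr))
          (pvDF (PySem.Set.update v (a :: fr)) (pvFlat adj (a :: fr))) := by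
  rw [pvBfsB]
  rfl

theorem pvFlat_nil (adj : PySem.Dict String (List String)) : pvFlat adj [] = [] := rfl

theorem pvFlat_append (adj : PySem.Dict String (List String)) (g f : List String) :
    pvFlat adj (g ++ f) = pvFlat adj g ++ pvFlat adj f := by
  simp [pvFlat]

theorem pv_flat_subset (adj : PySem.Dict String (List String)) (g : List String) :
    ∀ x ∈ pvFlat adj g, x ∈ adj.values.flatten := by
  intro x hx
  obtain ⟨u, _, hxu⟩ := List.mem_flatMap.1 hx
  exact pv_getD_mem_flatten adj u x hxu

-- core lemma: pvBfsB may absorb a prefix group g of its frontier into visited at once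
set_option maxHeartbeats 1600000 in
theorem pvBfsB_absorb (adj : PySem.Dict String (List String)) :
    ∀ (n : Nat) (v g f : List String),
      ((adj.values.flatten ++ (g ++ f)).toFinset \ v.toFinset).card ≤ n →
      (g ++ f).Nodup → (∀ x ∈ g ++ f, x ∉ v) →
      pvBfsB adj v (g ++ f)
        = pvBfsB adj (v ++ g) (f ++ pvDF (v ++ g ++ f) (pvFlat adj g)) := by
  intro n
  induction n with
  | zero =>
      intro v g f hcard hnd hdisj
      cases g with
      | nil => simp [pvFlat_nil, pvDF_nil]
      | cons a g' =>
          exfalso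
          have ha : a ∈ ((adj.values.flatten ++ ((a :: g') ++ f)).toFinset \ v.toFinset) := by
            simp only [Finset.mem_sdiff, List.mem_toFinset]
            exact ⟨List.mem_append.2 (Or.inr (by simp)), hdisj a (by simp)⟩
          have := Finset.card_pos.mpr ⟨a, ha⟩
          omega
  | succ n ih =>
      intro v g f hcard hnd hdisj
      cases g with
      | nil => simp [pvFlat_nil, pvDF_nil]
      | cons a g' =>
        have hGnd : (a :: g').Nodup := (List.nodup_append.mp hnd).1
        have hfnd : f.Nodup := (List.nodup_append.mp hnd).2.1
        have hGf : ∀ x ∈ (a :: g'), x ∉ f :=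
          fun x hx hxf => (List.nodup_append.mp hnd).2.2 x hx x hxf rfl
        have hnd' : (a :: (g' ++ f)).Nodup := hnd
        have hdisj' : ∀ x ∈ a :: (g' ++ f), x ∉ v := hdisj
        -- unfold the left-hand side once
        rw [List.cons_append, pvBfsB_cons,
            PySem.Set.update_eq_append_of_disjoint _ _ hnd' hdisj',
            show a :: (g' ++ f) = (a :: g') ++ f from rfl,
            pvFlat_append, pvDF_append]
        simp only [← List.append_assoc]
        set NEW := pvDF (v ++ (a :: g') ++ f) (pvFlat adj (a :: g')) with hNEW
        set D := pvDF (v ++ (a :: g') ++ f ++ pvFlat adj (a :: g')) (pvFlat adj f) with hD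
        clear_value NEW D
        have hmemNEW : ∀ x, x ∈ NEW ↔ x ∈ pvFlat adj (a :: g') ∧ ¬(x ∈ v ∨ x ∈ a :: g' ∨ x ∈ f) := by
          intro x
          rw [hNEW, mem_pvDF]
          simp [List.mem_append]
          tauto
        have hmemD : ∀ x, x ∈ D ↔ x ∈ pvFlat adj f
            ∧ ¬(x ∈ v ∨ x ∈ a :: g' ∨ x ∈ f ∨ x ∈ pvFlat adj (a :: g')) := by
          intro x
          rw [hD, mem_pvDF]
          simp [List.mem_append]
          tauto
        by_cases hfe : f ++ NEW = []
        · obtain ⟨hf0, hN0⟩ := List.append_eq_nil_iff.mp hfe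
          rw [hfe, pvBfsB_nil, hf0, hN0]
          rw [hf0] at hD
          rw [hD]
          simp [pvFlat_nil, pvDF_nil, pvBfsB_nil]
        · -- unfold the right-hand side once
          have hndfN : (f ++ NEW).Nodup := by
            rw [List.nodup_append]
            refine ⟨hfnd, by rw [hNEW]; exact nodup_pvDF _ _, ?_⟩
            intro x hxf y hyN hxy
            subst hxy
            exact ((hmemNEW x).1 hyN).2 (Or.inr (Or.inr hxf))
          have hdisjfN : ∀ x ∈ f ++ NEW, x ∉ v ++ (a :: g') := by
            intro x hx
            rcases List.mem_append.1 hx with h | h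
            · intro hc
              rcases List.mem_append.1 hc with h2 | h2
              · exact hdisj x (List.mem_append.2 (Or.inr h)) h2
              · exact hGf x h2 h
            · intro hc
              rcases List.mem_append.1 hc with h2 | h2
              · exact ((hmemNEW x).1 h).2 (Or.inl h2)
              · exact ((hmemNEW x).1 h).2 (Or.inr (Or.inl h2))
          obtain ⟨b, rest, hbr⟩ : ∃ b rest, f ++ NEW = b :: rest := by
            cases hc : f ++ NEW with
            | nil => exact absurd hc hfe
            | cons b rest => exact ⟨b, rest, rfl⟩
          rw [hbr, pvBfsB_cons, ← hbr,
              PySem.Set.update_eq_append_of_disjoint _ _ hndfN hdisjfN,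
              pvFlat_append, pvDF_append]
          -- apply the induction hypothesis on the left-hand side
          have hsub : ((adj.values.flatten ++ (NEW ++ D)).toFinset
                \ (v ++ (a :: g') ++ f).toFinset)
              ⊆ ((adj.values.flatten ++ ((a :: g') ++ f)).toFinset \ v.toFinset).erase a := by
            intro x hx
            simp only [Finset.mem_sdiff, List.mem_toFinset, List.mem_append, Finset.mem_erase,
              List.mem_cons] at hx ⊢
            obtain ⟨h1, h2⟩ := hx
            have hxU : x ∈ adj.values.flatten := by
              rcases h1 with h | h | h
              · exact h
              · exact pv_flat_subset adj _ x ((hmemNEW x).1 h).1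
              · exact pv_flat_subset adj _ x ((hmemD x).1 h).1
            refine ⟨fun he => h2 (by subst he; tauto), Or.inl hxU, fun hv => h2 (by tauto)⟩
          have ha : a ∈ ((adj.values.flatten ++ ((a :: g') ++ f)).toFinset \ v.toFinset) := by
            simp only [Finset.mem_sdiff, List.mem_toFinset]
            exact ⟨List.mem_append.2 (Or.inr (by simp)), hdisj a (by simp)⟩
          have hcard2 : ((adj.values.flatten ++ (NEW ++ D)).toFinset
              \ (v ++ (a :: g') ++ f).toFinset).card ≤ n := by
            have h1 := Finset.card_le_card hsub
            have h2 := Finset.card_erase_lt_of_mem ha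
            omega
          have hnd2 : (NEW ++ D).Nodup := by
            rw [List.nodup_append]
            refine ⟨by rw [hNEW]; exact nodup_pvDF _ _, by rw [hD]; exact nodup_pvDF _ _, ?_⟩
            intro x hxN y hyD hxy
            subst hxy
            exact ((hmemD x).1 hyD).2 (Or.inr (Or.inr (Or.inr ((hmemNEW x).1 hxN).1)))
          have hdisj2 : ∀ x ∈ NEW ++ D, x ∉ v ++ (a :: g') ++ f := by
            intro x hx hc
            have hc' : x ∈ v ∨ x ∈ a :: g' ∨ x ∈ f := by
              rcases List.mem_append.1 hc with h | h
              · rcases List.mem_append.1 h with h2 | h2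
                · exact Or.inl h2
                · exact Or.inr (Or.inl h2)
              · exact Or.inr (Or.inr h)
            rcases List.mem_append.1 hx with h | h
            · exact ((hmemNEW x).1 h).2 hc'
            · exact ((hmemD x).1 h).2 (by tauto)
          rw [ih (v ++ (a :: g') ++ f) NEW D hcard2 hnd2 hdisj2]
          -- both sides are now one level deeper; match the arguments
          congr 1
          · simp [List.append_assoc]
          · congr 1
            · rw [hD]
              apply pvDF_congr
              intro x
              have hNx := hmemNEW x
              have hDx := hmemD x
              simp only [List.mem_cons] at hNx hDx
              simp only [List.mem_append, List.mem_cons]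
              tauto
            · apply pvDF_congr
              intro x
              have hNx := hmemNEW x
              have hDx := hmemD x
              simp only [List.mem_cons] at hNx hDx
              simp only [List.mem_append, List.mem_cons]
              by_cases h1 : x ∈ v <;> by_cases h2 : x = a <;> by_cases h3 : x ∈ g' <;>
                by_cases h4 : x ∈ f <;> by_cases h5 : x ∈ pvFlat adj (a :: g') <;>
                by_cases h6 : x ∈ pvFlat adj f <;>
                simp [h1, h2, h3, h4, h5, h6, hNx, hDx]

theorem pvBfsA_nil (adj : PySem.Dict String (PySem.Set String)) (v : PySem.Set String) :
    pvBfsA adj v [] = v := by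
  rw [pvBfsA]

theorem pvBfsA_cons_mem (adj : PySem.Dict String (PySem.Set String)) (v : PySem.Set String)
    (cur : String) (rest : List String) (h : cur ∈ v) :
    pvBfsA adj v (cur :: rest) = pvBfsA adj v rest := by
  rw [pvBfsA, if_pos ((PySem.Set.contains_iff v cur).mpr h)]

theorem pvBfsA_cons_not_mem (adj : PySem.Dict String (PySem.Set String)) (v : PySem.Set String)
    (cur : String) (rest : List String) (h : cur ∉ v) :
    pvBfsA adj v (cur :: rest)
      = pvBfsA adj (PySem.Set.add v cur)
          (rest ++ (adj.getD cur PySem.Set.empty).filter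
            (fun n => !(PySem.Set.contains (PySem.Set.add v cur) n))) := by
  rw [pvBfsA, if_neg (by simp [pv_contains_eq, h])]

-- main induction: A's queue BFS equals B's level BFS on the deduplicated unvisited queue
theorem pvBfsA_eq (adjA : PySem.Dict String (PySem.Set String))
    (adjB : PySem.Dict String (List String))
    (hrel : ∀ u, adjA.getD u PySem.Set.empty = PySem.Set.ofList (adjB.getD u [])) :
    ∀ (n : Nat) (v q : List String), pvMeasA adjA v q ≤ n →
      pvBfsA adjA v q = pvBfsB adjB v (pvDF v q) := by
  intro n
  induction n with
  | zero =>
      intro v q hm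
      cases q with
      | nil => rw [pvBfsA_nil, pvDF_nil, pvBfsB_nil]
      | cons c r =>
          exfalso
          unfold pvMeasA at hm
          simp only [List.length_cons] at hm
          omega
  | succ n ih =>
      intro v q hm
      cases q with
      | nil => rw [pvBfsA_nil, pvDF_nil, pvBfsB_nil]
      | cons cur rest =>
        by_cases hcv : cur ∈ v
        · rw [pvBfsA_cons_mem adjA v cur rest hcv,
              ih v rest (by have := pvMeasA_skip adjA v cur rest; omega),
              pvDF_cons, if_pos hcv]
        · rw [pvBfsA_cons_not_mem adjA v cur rest hcv,
              ih _ _ (by have := pvMeasA_visit adjA v cur rest hcv; omega),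
              pvDF_cons, if_neg hcv]
          have hf0nd : ([cur] ++ pvDF (cur :: v) rest).Nodup := by
            rw [show [cur] ++ pvDF (cur :: v) rest = cur :: pvDF (cur :: v) rest from rfl]
            refine List.nodup_cons.mpr ⟨?_, nodup_pvDF _ _⟩
            intro hmem
            exact ((mem_pvDF _ _ _).1 hmem).2 (by simp)
          have hf0dj : ∀ x ∈ [cur] ++ pvDF (cur :: v) rest, x ∉ v := by
            intro x hx
            rcases List.mem_append.1 hx with h | h
            · rw [List.mem_singleton] at h; subst h; exact hcv
            · intro hv
              exact ((mem_pvDF _ _ _).1 h).2 (by simp [hv])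
          rw [show cur :: pvDF (cur :: v) rest = [cur] ++ pvDF (cur :: v) rest from rfl,
              pvBfsB_absorb adjB
                (((adjB.values.flatten ++ ([cur] ++ pvDF (cur :: v) rest)).toFinset
                  \ v.toFinset).card)
                v [cur] (pvDF (cur :: v) rest) le_rfl hf0nd hf0dj]
          congr 1
          · rw [PySem.Set.add_of_not_mem hcv]
          · rw [pvDF_append]
            congr 1
            · rw [PySem.Set.add_of_not_mem hcv]
              apply pvDF_congr
              intro x
              simp only [List.mem_append, List.mem_cons, List.mem_singleton]
              tauto
            · rw [show (adjA.getD cur PySem.Set.empty).filter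
                    (fun n => !(PySem.Set.contains (PySem.Set.add v cur) n))
                  = pvDF (PySem.Set.add v cur) (adjB.getD cur []) from by rw [hrel cur]; rfl,
                pvDF_pvDF,
                show pvFlat adjB [cur] = adjB.getD cur [] from by simp [pvFlat]]
              apply pvDF_congr
              intro x
              simp only [List.mem_append, PySem.Set.mem_add, mem_pvDF, List.mem_cons,
                List.mem_singleton]
              tauto

-- ===== VERDICT (by name: the statement is the Claim_ definition above) =====
theorem find_related_hunks_spec : Claim_equal_find_related_hunks := by
  intro hunk_id graph _
  unfold Spec_find_related_hunks find_related_hunks find_related_hunks_alt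
  have h := pvBfsA_eq (pvUndirected graph) (pvAdj graph) (pvAdj_rel graph)
    (pvMeasA (pvUndirected graph) PySem.Set.empty [hunk_id]) PySem.Set.empty [hunk_id] le_rfl
  rw [h]
  rfl
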